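-- pv_equiv track=rewrite | github.com/SooL/dev-ressources | scripts/AnalyseHeaderST/tools/bitmap.py | isMaskContinuous
-- ===== SOURCE A (Python) =====
-- def isMaskContinuous(mask : int) :
-- 	ret = True
-- 	state = 0
-- 	while mask != 0 :
-- 		if state == 0 and mask & 1 :
-- 			state = 1
-- 		elif state == 1 and not mask & 1 :
-- 			if mask != 0 : return False
-- 		mask >>= 1
-- 	return ret
-- ===== SOURCE B (Python) =====
-- def isMaskContinuous(mask : int):
--     low = mask & -mask          # lowest set bit (0 if mask == 0)
--     x = mask + low              # a contiguous run collapses into a single bit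
--     return x & (x - 1) == 0
-- ===== Notes on version B (the rewrite author's own statement) =====
-- stated objective: simpler
-- what changed: Replaces the bit-by-bit state-machine loop with the closed form low = mask & -mask; x = mask + low; x & (x-1) == 0 (adding the lowest set bit collapses a contiguous run into a single power of two).
-- outside the precondition, e.g. on isMaskContinuous(-2): A does not finish within the time limit, B returns True
import Mathlib
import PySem

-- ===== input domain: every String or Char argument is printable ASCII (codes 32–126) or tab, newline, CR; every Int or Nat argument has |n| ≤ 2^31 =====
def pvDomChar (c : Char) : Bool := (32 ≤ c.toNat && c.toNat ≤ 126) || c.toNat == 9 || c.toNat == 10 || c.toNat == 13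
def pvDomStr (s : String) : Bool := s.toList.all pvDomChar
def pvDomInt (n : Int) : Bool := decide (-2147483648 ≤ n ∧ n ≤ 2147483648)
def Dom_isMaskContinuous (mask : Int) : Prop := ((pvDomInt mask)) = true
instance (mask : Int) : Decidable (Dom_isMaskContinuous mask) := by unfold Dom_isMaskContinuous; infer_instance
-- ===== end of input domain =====

-- B replaces A's bit-by-bit state-machine loop by the closed form (mask + (mask & -mask)) & (mask + (mask & -mask) - 1) == 0 (objective: simpler).


-- ===== PORT A =====
-- the while loop; `state` and `mask` are the loop state. The Python loop never
-- terminates exactly when mask < 0 and (with state 0) -mask is a power of two, or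
-- (with state already 1) mask = -1: the infinite trailing 1-bits of a negative number
-- then never produce a 0 bit after a 1 bit.  The second guard returns `true` exactly
-- on that divergence region, only to make the Lean function total; those inputs are
-- outside Pre_.  Everywhere else the recursion is Python's loop body, step for step.
def isMaskContinuousLoop : Nat → Int → Int → Bool
  | 0, _, _ => true                                             -- fuel exhausted; never reached from isMaskContinuous's initial fuel
  | fuel+1, state, mask =>
    if mask = 0 then true                                       -- loop exits, returns ret = True
    else if mask < 0 ∧ ((state = 0 ∧ (-mask).toNat &&& ((-mask).toNat - 1) = 0)
                        ∨ (state ≠ 0 ∧ mask = -1)) then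
      true                                                      -- totality guard: Python diverges exactly here
    else if state = 0 ∧ PySem.Int.band mask 1 ≠ 0 then
      isMaskContinuousLoop fuel 1 (mask >>> (1:Nat))            -- state = 1; mask >>= 1
    else if state = 1 ∧ PySem.Int.band mask 1 = 0 then
      (if mask ≠ 0 then false
       else isMaskContinuousLoop fuel state (mask >>> (1:Nat))) -- `if mask != 0: return False`
    else
      isMaskContinuousLoop fuel state (mask >>> (1:Nat))        -- mask >>= 1

def isMaskContinuous (mask : Int) : Bool := isMaskContinuousLoop (mask.natAbs + 1) 0 mask

-- ===== PORT B =====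
def isMaskContinuous_alt (mask : Int) : Bool :=
  let low := PySem.Int.band mask (-mask)
  let x := mask + low
  PySem.Int.band x (x - 1) == 0

-- ===== PRECONDITION & SPEC =====
-- Pre_ excludes exactly the masks -2^k (mask < 0 with -mask a power of two, tested as
-- (-mask).toNat &&& ((-mask).toNat - 1) = 0), on which the Python A loops forever and
-- returns no value; on every other input, including all other negatives, A returns.
def Pre_isMaskContinuous (mask : Int) : Prop :=
  0 ≤ mask ∨ (-mask).toNat &&& ((-mask).toNat - 1) ≠ 0
instance (mask : Int) : Decidable (Pre_isMaskContinuous mask) := by unfold Pre_isMaskContinuous; infer_instance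
def pvWitness_isMaskContinuous : Int := (12)

def Spec_isMaskContinuous (mask : Int) (out : Bool) : Prop := out = isMaskContinuous_alt mask
instance (mask : Int) (out : Bool) : Decidable (Spec_isMaskContinuous mask out) := by unfold Spec_isMaskContinuous; infer_instance

-- ===== CLAIM (what is proved, stated in full; the proofs are below) =====
def Claim_equal_isMaskContinuous : Prop := ∀ (mask : Int), Dom_isMaskContinuous mask → Pre_isMaskContinuous mask → Spec_isMaskContinuous mask (isMaskContinuous mask)

-- ===== LEMMAS AND PROOFS =====

-- Nat-level doubling laws for &&&
theorem pv_land_even_odd (a b : Nat) : (2*a) &&& (2*b+1) = 2*(a &&& b) := by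
  have h := Nat.bitwise_bit (f := and) (by decide) false a true b
  simpa [Nat.bit, HAnd.hAnd, AndOp.and, Nat.land, Nat.mul_comm] using h

theorem pv_land_odd_even (a b : Nat) : (2*a+1) &&& (2*b) = 2*(a &&& b) := by
  have h := Nat.bitwise_bit (f := and) (by decide) true a false b
  simpa [Nat.bit, HAnd.hAnd, AndOp.and, Nat.land, Nat.mul_comm] using h

theorem pv_land_self (a : Nat) : a &&& a = a := by
  apply Nat.eq_of_testBit_eq
  intro i
  simp

-- Nat form of B's closed formula (for positive input)
def pvG (n : Nat) : Bool := decide ((n + (n - (n &&& (n-1)))) &&& (n + (n - (n &&& (n-1))) - 1) = 0)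

theorem pv_alt_cast (n : Nat) (hn : 0 < n) : isMaskContinuous_alt ↑n = pvG n := by
  have hlow : PySem.Int.band ↑n (-↑n) = ↑(n - (n &&& (n-1))) := by
    rw [PySem.Int.band.eq_1]
    have h1 : (0:Int) ≤ ↑n := by positivity
    have h2 : ¬ (0:Int) ≤ -↑n := by omega
    simp only [h1, h2, if_true, if_false]
    have e1 : (-(-(n:Int)) - 1).toNat = n - 1 := by omega
    have e2 : ((n:Int)).toNat = n := by omega
    rw [e2, e1]
  have hle : n &&& (n-1) ≤ n - 1 := Nat.and_le_right
  have hx : (↑n + (↑(n - (n &&& (n-1))) : Int)) = ↑(n + (n - (n &&& (n-1)))) := by push_cast; ring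
  have hx1 : (↑(n + (n - (n &&& (n-1)))) - (1:Int)) = ↑(n + (n - (n &&& (n-1))) - 1) := by omega
  show (PySem.Int.band (↑n + PySem.Int.band ↑n (-↑n)) ((↑n + PySem.Int.band ↑n (-↑n)) - 1) == 0) = pvG n
  rw [hlow, hx, hx1, PySem.Int.band_natCast]
  unfold pvG
  by_cases h : (n + (n - (n &&& (n-1)))) &&& (n + (n - (n &&& (n-1))) - 1) = 0 <;> simp [h]

theorem pvG_odd (r : Nat) : pvG (2*r+1) = ((r+1) &&& r == 0) := by
  have h1 : (2*r+1) &&& (2*r+1-1) = 2*r := by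
    have e : (2*r+1) - 1 = 2*r := by omega
    rw [e, pv_land_odd_even, pv_land_self]
  unfold pvG
  rw [h1]
  have h2 : (2*r+1 + (2*r+1 - 2*r)) = 2*(r+1) := by omega
  rw [h2]
  have h3 : 2*(r+1) - 1 = 2*r + 1 := by omega
  rw [h3, pv_land_even_odd]
  by_cases h : (r+1) &&& r = 0 <;> simp [h]

theorem pvG_even (r : Nat) (hr : 0 < r) : pvG (2*r) = pvG r := by
  have hle : r &&& (r-1) ≤ r - 1 := Nat.and_le_right
  have h1 : (2*r) &&& (2*r-1) = 2*(r &&& (r-1)) := by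
    have e : 2*r - 1 = 2*(r-1)+1 := by omega
    rw [e, pv_land_even_odd]
  unfold pvG
  rw [h1]
  have h2 : (2*r + (2*r - 2*(r &&& (r-1)))) = 2*(r + (r - (r &&& (r-1)))) := by omega
  rw [h2]
  set x := r + (r - (r &&& (r-1))) with hxdef
  have hxpos : 0 < x := by omega
  have h3 : 2*x - 1 = 2*(x-1)+1 := by omega
  rw [h3, pv_land_even_odd]
  by_cases h : x &&& (x-1) = 0 <;> simp [h]

-- unfolding facts for the loop
theorem pv_shift_cast (n : Nat) : ((n:Int) >>> (1:Nat)) = ((n/2 : Nat) : Int) := by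
  rw [← Int.natCast_shiftRight]
  norm_num [Nat.shiftRight_succ, Nat.shiftRight_zero]

theorem pv_shift_half (m : Int) : (m >>> (1:Nat)) = m / 2 := by
  rw [Int.shiftRight_eq_div_pow]
  norm_num

theorem pv_band_one_cast (n : Nat) : PySem.Int.band ↑n 1 = ((n % 2 : Nat) : Int) := by
  have e : (1:Int) = ((1:Nat):Int) := rfl
  rw [e, PySem.Int.band_natCast, Nat.and_one_is_mod]

theorem pv_band_one_even (m : Int) (h : m % 2 = 0) : PySem.Int.band m 1 = 0 := by
  rw [PySem.Int.band_one]
  simp [PySem.Int.mod, Int.fmod_eq_emod]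
  omega

theorem pv_band_one_odd (m : Int) (h : m % 2 = 1) : PySem.Int.band m 1 = 1 := by
  rw [PySem.Int.band_one]
  simp [PySem.Int.mod, Int.fmod_eq_emod]
  omega

-- A's inner loop once state = 1, nonnegative mask: true iff the remaining bits are a solid low block
theorem pv_loop1 : ∀ (f q : Nat), q < f → isMaskContinuousLoop f 1 ↑q = ((q+1) &&& q == 0) := by
  intro f
  induction f with
  | zero => intro q hq; omega
  | succ f ih =>
    intro q hq
    rcases Nat.eq_zero_or_pos q with hq | hq
    · subst hq
      rw [isMaskContinuousLoop]
      norm_num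
    · have h0 : ¬ ((q:Int) = 0) := by omega
      have hdiv : ¬ ((q:Int) < 0 ∧ (((1:Int) = 0 ∧ (-(q:Int)).toNat &&& ((-(q:Int)).toNat - 1) = 0)
                     ∨ ((1:Int) ≠ 0 ∧ (q:Int) = -1))) := by
        intro h
        exact absurd h.1 (by omega)
      rcases Nat.even_or_odd q with ⟨r, hr⟩ | ⟨r, hr⟩
      · -- q = 2r even, q > 0 : the loop returns False
        have hr' : q = 2*r := by omega
        have hb : PySem.Int.band ↑q 1 = 0 := by rw [pv_band_one_cast]; omega
        rw [isMaskContinuousLoop, if_neg h0, if_neg hdiv,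
            if_neg (by intro h; exact absurd h.1 (by norm_num)),
            if_pos ⟨rfl, hb⟩, if_pos h0]
        have e : (q+1) &&& q = q := by rw [hr', pv_land_odd_even, pv_land_self]
        rw [e]
        by_cases h : q = 0 <;> simp [h]
        omega
      · -- q = 2r+1 odd : the loop recurses with state 1 on q/2 = r
        have hb : PySem.Int.band ↑q 1 ≠ 0 := by rw [pv_band_one_cast]; omega
        rw [isMaskContinuousLoop, if_neg h0, if_neg hdiv,
            if_neg (by intro h; exact absurd h.1 (by norm_num)),
            if_neg (by intro h; exact hb h.2), pv_shift_cast]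
        have hq2 : q / 2 = r := by omega
        rw [hq2, ih r (by omega)]
        have e : (q+1) &&& q = 2*((r+1) &&& r) := by
          have e1 : q + 1 = 2*(r+1) := by omega
          rw [e1, hr, pv_land_even_odd]
        rw [e]
        by_cases h : (r+1) &&& r = 0 <;> simp [h]

-- A's loop from the start, nonnegative mask
theorem pv_loop0 : ∀ (f n : Nat), n < f → isMaskContinuousLoop f 0 ↑n = isMaskContinuous_alt ↑n := by
  intro f
  induction f with
  | zero => intro n hn; omega
  | succ f ih =>
    intro n hn
    rcases Nat.eq_zero_or_pos n with hn | hn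
    · subst hn
      rw [isMaskContinuousLoop]
      norm_num
      decide
    · have h0 : ¬ ((n:Int) = 0) := by omega
      have hdiv : ¬ ((n:Int) < 0 ∧ (((0:Int) = 0 ∧ (-(n:Int)).toNat &&& ((-(n:Int)).toNat - 1) = 0)
                     ∨ ((0:Int) ≠ 0 ∧ (n:Int) = -1))) := by
        intro h
        exact absurd h.1 (by omega)
      rw [pv_alt_cast n hn]
      rcases Nat.even_or_odd n with ⟨r, hr⟩ | ⟨r, hr⟩
      · -- n = 2r even, r > 0 : the loop recurses with state 0 on n/2 = r
        have hr' : n = 2*r := by omega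
        have hrpos : 0 < r := by omega
        have hb : PySem.Int.band ↑n 1 = 0 := by rw [pv_band_one_cast]; omega
        rw [isMaskContinuousLoop, if_neg h0, if_neg hdiv,
            if_neg (by intro h; exact h.2 hb),
            if_neg (by intro h; exact absurd h.1 (by norm_num)), pv_shift_cast]
        have hn2 : n / 2 = r := by omega
        rw [hn2, ih r (by omega), pv_alt_cast r hrpos, hr', pvG_even r hrpos]
      · -- n = 2r+1 odd : the loop enters state 1 on n/2 = r
        have hb : PySem.Int.band ↑n 1 ≠ 0 := by rw [pv_band_one_cast]; omega
        rw [isMaskContinuousLoop, if_neg h0, if_neg hdiv,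
            if_pos ⟨rfl, hb⟩, pv_shift_cast]
        have hn2 : n / 2 = r := by omega
        rw [hn2, pv_loop1 f r (by omega), hr, pvG_odd r]

-- A's inner loop once state = 1, negative mask other than -1: returns False
theorem pv_neg_loop1 : ∀ (f : Nat) (m : Int), (-m).toNat < f → m < 0 → m ≠ -1 →
    isMaskContinuousLoop f 1 m = false := by
  intro f
  induction f with
  | zero => intro m hk hm _; omega
  | succ f ih =>
    intro m hk hm h1
    have h0 : ¬ (m = 0) := by omega
    have hdiv : ¬ (m < 0 ∧ (((1:Int) = 0 ∧ (-m).toNat &&& ((-m).toNat - 1) = 0)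
                   ∨ ((1:Int) ≠ 0 ∧ m = -1))) := by
      rintro ⟨_, (⟨h10, _⟩ | ⟨_, e⟩)⟩
      · exact absurd h10 (by norm_num)
      · exact h1 e
    rcases Int.even_or_odd m with ⟨r, hr⟩ | ⟨r, hr⟩
    · -- m even : return False
      have hb : PySem.Int.band m 1 = 0 := pv_band_one_even m (by omega)
      rw [isMaskContinuousLoop, if_neg h0, if_neg hdiv,
          if_neg (by intro h; exact absurd h.1 (by norm_num)),
          if_pos ⟨rfl, hb⟩, if_pos h0]
    · -- m odd, m ≤ -3 : recurse with state 1 on m/2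
      have hm3 : m ≤ -3 := by omega
      have hb : PySem.Int.band m 1 ≠ 0 := by rw [pv_band_one_odd m (by omega)]; norm_num
      rw [isMaskContinuousLoop, if_neg h0, if_neg hdiv,
          if_neg (by intro h; exact absurd h.1 (by norm_num)),
          if_neg (by intro h; exact hb h.2), pv_shift_half]
      exact ih (m/2) (by omega) (by omega) (by omega)

-- A's loop from the start, negative mask whose absolute value is not a power of two: returns False
theorem pv_neg_loop0 : ∀ (f : Nat) (m : Int), (-m).toNat < f → m < 0 →
    (-m).toNat &&& ((-m).toNat - 1) ≠ 0 → isMaskContinuousLoop f 0 m = false := by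
  intro f
  induction f with
  | zero => intro m hk hm _; omega
  | succ f ih =>
    intro m hk hm hnp
    have h0 : ¬ (m = 0) := by omega
    have hdiv : ¬ (m < 0 ∧ (((0:Int) = 0 ∧ (-m).toNat &&& ((-m).toNat - 1) = 0)
                   ∨ ((0:Int) ≠ 0 ∧ m = -1))) := by
      rintro ⟨_, (⟨_, t⟩ | ⟨h00, _⟩)⟩
      · exact hnp t
      · exact h00 rfl
    rcases Int.even_or_odd m with ⟨r, hr⟩ | ⟨r, hr⟩
    · -- m even : recurse with state 0 on m/2
      have hb : PySem.Int.band m 1 = 0 := pv_band_one_even m (by omega)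
      rw [isMaskContinuousLoop, if_neg h0, if_neg hdiv,
          if_neg (by intro h; exact h.2 hb),
          if_neg (by intro h; exact absurd h.1 (by norm_num)), pv_shift_half]
      have hhalf : (-(m/2)).toNat = (-m).toNat / 2 := by omega
      apply ih (m/2) (by omega) (by omega)
      rw [hhalf]
      intro hz
      apply hnp
      have hn2 : (-m).toNat = 2 * ((-m).toNat / 2) := by omega
      have hpos : 1 ≤ (-m).toNat / 2 := by omega
      rw [hn2]
      have e : 2 * ((-m).toNat / 2) - 1 = 2 * ((-m).toNat / 2 - 1) + 1 := by omega
      rw [e, pv_land_even_odd, hz]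
    · -- m odd : m = -1 is excluded by hnp, so m ≤ -3; enter state 1 on m/2
      have hm1 : m ≠ -1 := by
        intro e
        apply hnp
        rw [e]
        decide
      have hb : PySem.Int.band m 1 ≠ 0 := by rw [pv_band_one_odd m (by omega)]; norm_num
      rw [isMaskContinuousLoop, if_neg h0, if_neg hdiv,
          if_pos ⟨rfl, hb⟩, pv_shift_half]
      exact pv_neg_loop1 f (m/2) (by omega) (by omega) (by omega)

-- B on a negative mask whose absolute value is not a power of two: returns False
theorem pv_neg_alt (m : Int) (hm : m < 0)
    (hnp : (-m).toNat &&& ((-m).toNat - 1) ≠ 0) : isMaskContinuous_alt m = false := by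
  have hn : 0 < (-m).toNat := by omega
  have hlow : PySem.Int.band m (-m) = ↑((-m).toNat - ((-m).toNat &&& ((-m).toNat - 1))) := by
    rw [PySem.Int.band.eq_1]
    have h1 : ¬ (0:Int) ≤ m := by omega
    have h2 : (0:Int) ≤ -m := by omega
    simp only [h1, h2, if_true, if_false]
    have e1 : (-m - 1).toNat = (-m).toNat - 1 := by omega
    rw [e1]
  have hland : (-m).toNat &&& ((-m).toNat - 1) ≤ (-m).toNat - 1 := Nat.and_le_right
  have h1land : 1 ≤ (-m).toNat &&& ((-m).toNat - 1) := Nat.one_le_iff_ne_zero.mpr hnp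
  have hxneg : m + ((((-m).toNat - ((-m).toNat &&& ((-m).toNat - 1))) : Nat) : Int) < 0 := by omega
  show (PySem.Int.band (m + PySem.Int.band m (-m)) ((m + PySem.Int.band m (-m)) - 1) == 0) = false
  rw [hlow]
  set x := m + ((((-m).toNat - ((-m).toNat &&& ((-m).toNat - 1))) : Nat) : Int) with hxdef
  rw [PySem.Int.band.eq_1]
  have hc1 : ¬ (0:Int) ≤ x := by omega
  have hc2 : ¬ (0:Int) ≤ x - 1 := by omega
  simp only [hc1, hc2, if_false]
  have hne : (-((((-x - 1).toNat ||| (-(x-1) - 1).toNat) : Nat) : Int) - 1) ≠ 0 := by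
    have := Int.natCast_nonneg ((-x - 1).toNat ||| (-(x-1) - 1).toNat)
    omega
  exact beq_eq_false_iff_ne.mpr hne

-- ===== VERDICT (by name: the statement is the Claim_ definition above) =====
theorem isMaskContinuous_spec : Claim_equal_isMaskContinuous := by
  intro mask _ hpre
  unfold Pre_isMaskContinuous at hpre
  unfold Spec_isMaskContinuous isMaskContinuous
  rcases Int.lt_or_le mask 0 with hlt | hge
  · have hnp : (-mask).toNat &&& ((-mask).toNat - 1) ≠ 0 := by
      rcases hpre with h | h
      · omega
      · exact h
    rw [pv_neg_loop0 (mask.natAbs + 1) mask (by omega) hlt hnp, pv_neg_alt mask hlt hnp]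
  · obtain ⟨n, hn⟩ : ∃ n : Nat, mask = ↑n := ⟨mask.toNat, by omega⟩
    subst hn
    have e : ((n:Int).natAbs) = n := by omega
    rw [e]
    exact pv_loop0 (n+1) n (by omega)
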